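-- pv_equiv track=rewrite | github.com/VictorieeMan/Advent_Of_Code_Solutions | events/2015/day11/2015-11-sol.py | check_for_two_seperate_letter_pairs
-- ===== SOURCE A (Python) =====
-- def check_for_two_seperate_letter_pairs(password):
--     """Looking for two non overlapping pairs of letters in the string,
--     ex. aa and aa or xx and yy
--     """
--     count = 0
--     skip = None
--     for i in range(len(password)-1):
--         if i != skip and password[i] == password[i+1]:
--             count += 1
--             skip = i + 1
--             if count == 2:
--                 return True
--
--     return False
-- ===== SOURCE B (Python) =====
-- def check_for_two_seperate_letter_pairs(password):
--     """Run-length counting: a run of L equal characters contains exactly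
--     L//2 non-overlapping adjacent pairs; the password passes iff the runs
--     contribute two pairs in total."""
--     total = 0
--     run = 0
--     prev = None
--     for c in password:
--         if c == prev:
--             run += 1
--         else:
--             total += run // 2
--             run = 1
--             prev = c
--     return total + run // 2 >= 2
-- ===== Notes on version B (the rewrite author's own statement) =====
-- stated objective: alternative
-- what changed: Replaces A's index scan with a skip sentinel and early return by a single run-length pass: each maximal run of L equal characters contributes exactly L//2 non-overlapping pairs, and the total is compared with 2.
import Mathlib
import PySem

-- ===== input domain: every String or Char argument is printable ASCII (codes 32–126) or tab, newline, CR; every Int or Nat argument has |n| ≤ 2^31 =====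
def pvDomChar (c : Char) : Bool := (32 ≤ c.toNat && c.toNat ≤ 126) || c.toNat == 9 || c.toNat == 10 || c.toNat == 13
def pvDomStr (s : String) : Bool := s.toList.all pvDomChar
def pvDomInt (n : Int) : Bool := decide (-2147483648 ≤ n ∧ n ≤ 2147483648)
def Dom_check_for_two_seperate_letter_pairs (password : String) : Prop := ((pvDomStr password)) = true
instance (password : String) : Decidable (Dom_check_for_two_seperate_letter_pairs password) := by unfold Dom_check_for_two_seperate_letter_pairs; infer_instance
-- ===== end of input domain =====

-- B replaces A's index scan with a skip sentinel by a single run-length pass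
-- (a run of L equal characters contributes L/2 pairs); alternative decomposition, not claimed faster.

-- ===== PORT A =====
-- for i in range(len(password)-1): if i != skip and password[i] == password[i+1]: …
def aGo (cs : List Char) (i : Nat) (count : Nat) (skip : Option Nat) : Bool :=
  if h : i + 1 < cs.length then
    if some i ≠ skip ∧ cs[i] = cs[i + 1] then
      if count + 1 = 2 then true
      else aGo cs (i + 1) (count + 1) (some (i + 1))
    else aGo cs (i + 1) count skip
  else false
termination_by cs.length - i

def check_for_two_seperate_letter_pairs (password : String) : Bool :=
  aGo password.toList 0 0 none

-- ===== PORT B =====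
-- fold over the characters keeping (total, current run length, previous char)
def check_for_two_seperate_letter_pairs_alt (password : String) : Bool :=
  let s := password.toList.foldl
    (fun (s : Nat × Nat × Option Char) c =>
      if some c = s.2.2 then (s.1, s.2.1 + 1, s.2.2)
      else (s.1 + s.2.1 / 2, 1, some c))
    (0, 0, none)
  decide (s.1 + s.2.1 / 2 ≥ 2)

-- ===== PRECONDITION & SPEC =====
def Spec_check_for_two_seperate_letter_pairs (password : String) (out : Bool) : Prop := out = check_for_two_seperate_letter_pairs_alt password
instance (password : String) (out : Bool) : Decidable (Spec_check_for_two_seperate_letter_pairs password out) := by unfold Spec_check_for_two_seperate_letter_pairs; infer_instance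

-- ===== CLAIM (what is proved, stated in full; the proofs are below) =====
def Claim_equal_check_for_two_seperate_letter_pairs : Prop := ∀ (password : String), Dom_check_for_two_seperate_letter_pairs password → Spec_check_for_two_seperate_letter_pairs password (check_for_two_seperate_letter_pairs password)

-- ===== LEMMAS AND PROOFS =====

-- structural (list) form of A's loop: sk says "current position is skipped"
def ga : List Char → Bool → Nat → Bool
  | c :: d :: rest, sk, count =>
    if sk = false ∧ c = d then
      if count + 1 = 2 then true else ga (d :: rest) true (count + 1)
    else ga (d :: rest) false count
  | _, _, _ => false

-- greedy pair count, same traversal as ga but uncapped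
def pcount : List Char → Bool → Nat
  | c :: d :: rest, sk =>
    if sk = false ∧ c = d then 1 + pcount (d :: rest) true
    else pcount (d :: rest) false
  | _, _ => 0

-- run-length pair count, same traversal as B's fold
def gf : List Char → Option Char → Nat → Nat
  | [], _, run => run / 2
  | c :: rest, prev, run =>
    if some c = prev then gf rest prev (run + 1)
    else run / 2 + gf rest (some c) 1

lemma aGo_eq_ga (cs : List Char) :
    ∀ n i count skip, cs.length - i ≤ n → (∀ j, skip = some j → j ≤ i) →
      aGo cs i count skip = ga (cs.drop i) (decide (skip = some i)) count := by
  intro n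
  induction n with
  | zero =>
    intro i count skip hle _
    have hi : cs.length ≤ i := by omega
    have hnot : ¬ (i + 1 < cs.length) := by omega
    rw [aGo, dif_neg hnot, List.drop_eq_nil_of_le hi]
    rfl
  | succ n ih =>
    intro i count skip hle hinv
    rw [aGo]
    by_cases h : i + 1 < cs.length
    · have hd : cs.drop i = cs[i] :: cs.drop (i + 1) :=
        List.drop_eq_getElem_cons (by omega)
      have hd2 : cs.drop (i + 1) = cs[i + 1] :: cs.drop (i + 2) :=
        List.drop_eq_getElem_cons (by omega)
      rw [hd, hd2, ga]
      have hcond : (some i ≠ skip ∧ cs[i] = cs[i + 1]) ↔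
          (decide (skip = some i) = false ∧ cs[i] = cs[i + 1]) := by
        constructor
        · rintro ⟨h1, h2⟩
          exact ⟨by simp [Ne.symm h1], h2⟩
        · rintro ⟨h1, h2⟩
          refine ⟨fun he => ?_, h2⟩
          rw [← he] at h1; simp at h1
      by_cases hc : some i ≠ skip ∧ cs[i] = cs[i + 1]
      · rw [dif_pos h, if_pos hc, if_pos (hcond.mp hc)]
        by_cases h2 : count + 1 = 2
        · simp [h2]
        · rw [if_neg h2, if_neg h2]
          have := ih (i + 1) (count + 1) (some (i + 1)) (by omega)
            (fun j hj => by simp at hj; omega)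
          rw [this, hd2]
          simp
      · rw [dif_pos h, if_neg hc, if_neg (fun hx => hc (hcond.mpr hx))]
        have hne : decide (skip = some (i + 1)) = false := by
          simp only [decide_eq_false_iff_not]
          intro he
          have := hinv (i + 1) he
          omega
        have := ih (i + 1) count skip (by omega) (fun j hj => by
          have := hinv j hj; omega)
        rw [this, hd2, hne]
    · rw [dif_neg h]
      rcases Nat.lt_or_ge i cs.length with hi | hi
      · have hdrop : cs.drop i = [cs[i]] := by
          rw [List.drop_eq_getElem_cons (by omega),
            List.drop_eq_nil_of_le (by omega : cs.length ≤ i + 1)]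
        rw [hdrop]
        rfl
      · rw [List.drop_eq_nil_of_le hi]
        rfl

lemma ga_eq_pcount : ∀ (cs : List Char) (sk : Bool) (count : Nat), count < 2 →
    ga cs sk count = decide (2 ≤ count + pcount cs sk) := by
  intro cs
  induction cs with
  | nil =>
    intro sk count h
    simp [ga, pcount]
    omega
  | cons c rest ih =>
    intro sk count h
    match rest with
    | [] =>
      simp [ga, pcount]
      omega
    | d :: rest' =>
      rw [ga, pcount]
      by_cases hc : sk = false ∧ c = d
      · rw [if_pos hc, if_pos hc]
        by_cases h2 : count + 1 = 2
        · have hp : 2 ≤ count + (1 + pcount (d :: rest') true) := by omega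
          simp [h2, hp]
        · rw [if_neg h2, ih true (count + 1) (by omega), ← Nat.add_assoc]
      · rw [if_neg hc, if_neg hc, ih false count h]

lemma pcount_skip : ∀ (ys : List Char) (x : Char), pcount (x :: ys) true = pcount ys false := by
  intro ys x
  match ys with
  | [] => rfl
  | y :: rest =>
    rw [pcount]
    simp

lemma pcount_replicate_append (p c : Char) (cs : List Char) (hne : c ≠ p) :
    ∀ r, pcount (List.replicate r p ++ c :: cs) false = r / 2 + pcount (c :: cs) false := by
  intro r
  induction r using Nat.twoStepInduction with
  | zero => simp
  | one =>
    simp only [List.replicate_one, List.cons_append, List.nil_append]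
    rw [pcount, if_neg (fun hx => hne hx.2.symm)]
    simp
  | more r ih _ =>
    have hrep : List.replicate (r + 2) p ++ c :: cs =
        p :: p :: (List.replicate r p ++ c :: cs) := by
      simp [List.replicate_succ]
    rw [hrep, pcount, if_pos ⟨rfl, rfl⟩, pcount_skip, ih]
    omega

lemma pcount_replicate (p : Char) :
    ∀ r, pcount (List.replicate r p) false = r / 2 := by
  intro r
  induction r using Nat.twoStepInduction with
  | zero => rfl
  | one => rfl
  | more r ih _ =>
    have hrep : List.replicate (r + 2) p = p :: p :: List.replicate r p := by
      simp [List.replicate_succ]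
    rw [hrep, pcount, if_pos ⟨rfl, rfl⟩, pcount_skip, ih]
    omega

lemma gf_eq_pcount : ∀ (cs : List Char) (p : Char) (r : Nat),
    gf cs (some p) r = pcount (List.replicate r p ++ cs) false := by
  intro cs
  induction cs with
  | nil =>
    intro p r
    simp [gf, pcount_replicate]
  | cons c rest ih =>
    intro c' r
    rw [gf]
    by_cases hc : c = c'
    · subst hc
      rw [if_pos rfl, ih c (r + 1)]
      have : List.replicate r c ++ c :: rest = List.replicate (r + 1) c ++ rest := by
        rw [List.replicate_succ']
        simp
      rw [this]
    · rw [if_neg (by simp [hc]), ih c 1,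
        pcount_replicate_append c' c rest hc r]
      simp

lemma fold_eq_gf : ∀ (cs : List Char) (t r : Nat) (p : Option Char),
    (cs.foldl
      (fun (s : Nat × Nat × Option Char) c =>
        if some c = s.2.2 then (s.1, s.2.1 + 1, s.2.2)
        else (s.1 + s.2.1 / 2, 1, some c)) (t, r, p)).1 +
    (cs.foldl
      (fun (s : Nat × Nat × Option Char) c =>
        if some c = s.2.2 then (s.1, s.2.1 + 1, s.2.2)
        else (s.1 + s.2.1 / 2, 1, some c)) (t, r, p)).2.1 / 2 = t + gf cs p r := by
  intro cs
  induction cs with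
  | nil =>
    intro t r p
    simp [gf]
  | cons c rest ih =>
    intro t r p
    by_cases hc : some c = p
    · have := ih t (r + 1) p
      simp only [List.foldl_cons, gf, hc] at this ⊢
      simpa [hc] using this
    · have := ih (t + r / 2) 1 (some c)
      simp only [List.foldl_cons, gf] at this ⊢
      simp only [hc, if_false] at this ⊢
      rw [this]
      omega

lemma main_eq (cs : List Char) :
    aGo cs 0 0 none =
      (let s := cs.foldl
        (fun (s : Nat × Nat × Option Char) c =>
          if some c = s.2.2 then (s.1, s.2.1 + 1, s.2.2)
          else (s.1 + s.2.1 / 2, 1, some c)) (0, 0, none)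
       decide (s.1 + s.2.1 / 2 ≥ 2)) := by
  have hA := aGo_eq_ga cs cs.length 0 0 none (by omega) (by simp)
  simp only [List.drop_zero] at hA
  have hB := fold_eq_gf cs 0 0 none
  have hPG : gf cs none 0 = pcount cs false := by
    match cs with
    | [] => rfl
    | c :: rest =>
      rw [gf, if_neg (by simp), gf_eq_pcount]
      simp
  have hga : ga cs (decide ((none : Option Nat) = some 0)) 0 =
      decide (2 ≤ 0 + pcount cs false) := by
    rw [show (decide ((none : Option Nat) = some 0)) = false by simp]
    exact ga_eq_pcount cs false 0 (by omega)
  rw [hA, hga]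
  refine decide_eq_decide.mpr ?_
  rw [ge_iff_le, hB, hPG]

-- ===== VERDICT (by name: the statement is the Claim_ definition above) =====
theorem check_for_two_seperate_letter_pairs_spec : Claim_equal_check_for_two_seperate_letter_pairs := by
  intro password _
  unfold Spec_check_for_two_seperate_letter_pairs check_for_two_seperate_letter_pairs check_for_two_seperate_letter_pairs_alt
  exact main_eq password.toList
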